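-- pv_equiv track=rewrite | github.com/therealrohan303/Streaming-Merge-Pro | test_cast_crew.py | bfs_subgraph
-- ===== SOURCE A (Python) =====
-- from collections import deque
--
-- def bfs_subgraph(seed_id: str, adj: dict, max_nodes: int = 100, max_hops: int = 2):
--     visited: dict = {seed_id: 0}
--     queue = deque([(seed_id, 0)])
--     edges: set = set()
--     while queue and len(visited) < max_nodes:
--         node, hop = queue.popleft()
--         if hop >= max_hops:
--             continue
--         for nbr, weight in sorted(adj.get(node, {}).items(), key=lambda x: -x[1]):
--             if len(visited) >= max_nodes:
--                 break
--             if nbr not in visited: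
--                 visited[nbr] = hop + 1
--                 queue.append((nbr, hop + 1))
--             if nbr in visited:
--                 key = (min(node, nbr), max(node, nbr))
--                 edges.add((*key, weight))
--     return set(visited.keys()), edges
-- ===== SOURCE B (Python) =====
-- def bfs_subgraph(seed_id: str, adj: dict, max_nodes: int = 100, max_hops: int = 2):
--     # Two staged passes instead of one capped BFS loop.
--     # Phase 1: UNCAPPED reachability within max_hops, using the visited-order list as
--     # its own work list (no queue, no cap logic): this fixes the deterministic order in
--     # which A would ever touch nodes.
--     hop_of = {seed_id: 0}
--     order = [seed_id]
--     i = 0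
--     while i < len(order):
--         node = order[i]
--         i += 1
--         hop = hop_of[node]
--         if hop >= max_hops:
--             continue
--         for nbr, _ in sorted(adj.get(node, {}).items(), key=lambda x: -x[1]):
--             if nbr not in hop_of:
--                 hop_of[nbr] = hop + 1
--                 order.append(nbr)
--     # Flatten the whole traversal into one event stream (node, nbr, weight).
--     events = [(node, nbr, w)
--               for node in order if hop_of[node] < max_hops
--               for nbr, w in sorted(adj.get(node, {}).items(), key=lambda x: -x[1])]
--     # Phase 2: replay the stream with the node cap: every event before the cutoff
--     # contributes its neighbour to the node set and its (undirected) edge.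
--     nodes = {seed_id}
--     edges = set()
--     for node, nbr, w in events:
--         if len(nodes) >= max_nodes:
--             break
--         nodes.add(nbr)
--         edges.add((min(node, nbr), max(node, nbr), w))
--     return nodes, edges
-- ===== Notes on version B (the rewrite author's own statement) =====
-- stated objective: alternative
-- what changed: Replaced A's single capped BFS loop (deque of (node,hop) pairs, cap checks interleaved with expansion) by two staged passes: an uncapped reachability pass that uses the visited-order list as its own work list and carries no cap logic, then a flat replay of the flattened event stream where a single counter enforces the node cap.
import Mathlib
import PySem

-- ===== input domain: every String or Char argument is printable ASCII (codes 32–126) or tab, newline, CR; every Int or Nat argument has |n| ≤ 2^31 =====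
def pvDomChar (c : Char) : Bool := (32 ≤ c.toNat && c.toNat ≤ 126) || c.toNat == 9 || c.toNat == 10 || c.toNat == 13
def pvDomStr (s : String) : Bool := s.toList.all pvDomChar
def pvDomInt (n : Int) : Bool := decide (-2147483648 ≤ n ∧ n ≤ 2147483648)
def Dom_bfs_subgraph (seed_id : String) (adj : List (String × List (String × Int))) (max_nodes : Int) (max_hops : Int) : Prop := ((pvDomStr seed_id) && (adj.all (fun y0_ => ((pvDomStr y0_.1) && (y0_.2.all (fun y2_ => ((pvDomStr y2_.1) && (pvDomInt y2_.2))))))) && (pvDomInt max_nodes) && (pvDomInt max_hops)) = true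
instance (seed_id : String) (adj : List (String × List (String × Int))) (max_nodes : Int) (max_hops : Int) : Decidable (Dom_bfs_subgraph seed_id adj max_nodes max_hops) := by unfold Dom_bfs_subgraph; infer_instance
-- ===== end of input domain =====

-- B replaces A's single capped BFS loop by two staged passes: an UNCAPPED reachability
-- pass (the visited-order list is its own work list; no queue, no cap logic), then a
-- flat replay of the resulting event stream with the node-cap counter; objective: alternative.

-- shared by both ports (the identical Python expressions):
-- (min(node, nbr), max(node, nbr), weight)
def pvEdge (node nbr : String) (w : Int) : String × String × Int :=
  if node ≤ nbr then (node, nbr, w) else (nbr, node, w)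

-- sorted(adj.get(node, {}).items(), key=lambda x: -x[1])
def pvNbrs (adj : List (String × List (String × Int))) (node : String) : List (String × Int) :=
  PySem.List.sorted (PySem.Dict.ofList ((PySem.Dict.ofList adj).getD node [])).items
    (fun x => -x.2) false

-- ===== PORT A =====
-- the inner 'for nbr, weight in sorted(...)' loop with its break
def pvProcA (mn : Int) (node : String) (hop : Int) :
    List (String × Int) → PySem.Dict String Int → List (String × Int) →
    PySem.Set (String × String × Int) →
    PySem.Dict String Int × List (String × Int) × PySem.Set (String × String × Int)
  | [], v, q, e => (v, q, e)
  | (nbr, w) :: rest, v, q, e =>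
    if mn ≤ (v.size : Int) then (v, q, e)
    else
      let p := if v.contains nbr = false then (v.insert nbr (hop + 1), q ++ [(nbr, hop + 1)])
               else (v, q)
      let e' := if p.1.contains nbr then PySem.Set.add e (pvEdge node nbr w) else e
      pvProcA mn node hop rest p.1 p.2 e'

-- the 'while queue and len(visited) < max_nodes' loop (fuel only makes it total; it is
-- chosen large enough to never run out)
def pvLoopA (adj : List (String × List (String × Int))) (mn mh : Int) :
    Nat → List (String × Int) → PySem.Dict String Int → PySem.Set (String × String × Int) →
    PySem.Dict String Int × PySem.Set (String × String × Int)
  | 0, _, v, e => (v, e)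
  | _ + 1, [], v, e => (v, e)
  | f + 1, (node, hop) :: rest, v, e =>
    if (v.size : Int) < mn then
      if mh ≤ hop then pvLoopA adj mn mh f rest v e
      else
        let r := pvProcA mn node hop (pvNbrs adj node) v rest e
        pvLoopA adj mn mh f r.2.1 r.1 r.2.2
    else (v, e)

def bfs_subgraph (seed_id : String) (adj : List (String × List (String × Int))) (max_nodes : Int) (max_hops : Int) : List String × (List (String × String × Int)) :=
  let v0 := PySem.Dict.insert PySem.Dict.empty seed_id 0
  let r := pvLoopA adj max_nodes max_hops (1 + adj.foldl (fun n p => n + p.2.length) 0)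
    [(seed_id, 0)] v0 PySem.Set.empty
  (PySem.Set.ofList r.1.keys, r.2)

-- ===== PORT B =====
-- phase-1 inner loop: 'for nbr, _ in sorted(...): if nbr not in hop_of: ...', collecting
-- the nodes appended to `order`
def pvInsB (hop : Int) :
    List (String × Int) → PySem.Dict String Int → List String →
    PySem.Dict String Int × List String
  | [], v, new => (v, new)
  | (nbr, _) :: rest, v, new =>
    if v.contains nbr = false then pvInsB hop rest (v.insert nbr (hop + 1)) (new ++ [nbr])
    else pvInsB hop rest v new

-- phase-1 pointer loop 'while i < len(order)': the unprocessed suffix is the first list,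
-- the processed prefix (`done`) accumulates `order`; 'hop_of[node]' is ported as getD
-- (exact here: every node put on `order` is a key of hop_of, so the lookup never raises).
-- Fuel only makes it total and is chosen large enough to never run out.
def pvP1 (adj : List (String × List (String × Int))) (mh : Int) :
    Nat → List String → PySem.Dict String Int → List String →
    PySem.Dict String Int × List String
  | 0, qs, v, done => (v, done ++ qs)
  | _ + 1, [], v, done => (v, done)
  | f + 1, node :: rest, v, done =>
    if mh ≤ v.getD node 0 then pvP1 adj mh f rest v (done ++ [node])
    else
      let p := pvInsB (v.getD node 0) (pvNbrs adj node) v []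
      pvP1 adj mh f (rest ++ p.2) p.1 (done ++ [node])

-- the events comprehension
def pvBlocks (adj : List (String × List (String × Int))) (mh : Int)
    (v : PySem.Dict String Int) (ord : List String) : List (String × String × Int) :=
  (ord.filter (fun n => decide (v.getD n 0 < mh))).flatMap
    (fun node => (pvNbrs adj node).map (fun p => (node, p.1, p.2)))

-- phase-2 replay loop with its break
def pvReplayB (mn : Int) :
    List (String × String × Int) → PySem.Set String → PySem.Set (String × String × Int) →
    PySem.Set String × PySem.Set (String × String × Int)
  | [], ns, es => (ns, es)
  | (node, nbr, w) :: rest, ns, es =>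
    if mn ≤ (ns.length : Int) then (ns, es)
    else pvReplayB mn rest (PySem.Set.add ns nbr) (PySem.Set.add es (pvEdge node nbr w))

def bfs_subgraph_alt (seed_id : String) (adj : List (String × List (String × Int))) (max_nodes : Int) (max_hops : Int) : List String × (List (String × String × Int)) :=
  let v0 := PySem.Dict.insert PySem.Dict.empty seed_id 0
  let r := pvP1 adj max_hops (1 + adj.foldl (fun n p => n + p.2.length) 0) [seed_id] v0 []
  pvReplayB max_nodes (pvBlocks adj max_hops r.1 r.2)
    (PySem.Set.add PySem.Set.empty seed_id) PySem.Set.empty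

-- ===== PRECONDITION & SPEC =====
def Spec_bfs_subgraph (seed_id : String) (adj : List (String × List (String × Int))) (max_nodes : Int) (max_hops : Int) (out : List String × (List (String × String × Int))) : Prop := out = bfs_subgraph_alt seed_id adj max_nodes max_hops
instance (seed_id : String) (adj : List (String × List (String × Int))) (max_nodes : Int) (max_hops : Int) (out : List String × (List (String × String × Int))) : Decidable (Spec_bfs_subgraph seed_id adj max_nodes max_hops out) := by unfold Spec_bfs_subgraph; infer_instance

-- ===== CLAIM (what is proved, stated in full; the proofs are below) =====
def Claim_equal_bfs_subgraph : Prop := ∀ (seed_id : String) (adj : List (String × List (String × Int))) (max_nodes : Int) (max_hops : Int), Dom_bfs_subgraph seed_id adj max_nodes max_hops → Spec_bfs_subgraph seed_id adj max_nodes max_hops (bfs_subgraph seed_id adj max_nodes max_hops)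

-- ===== LEMMAS AND PROOFS =====

-- the event stream A's loop will emit from a given state, generated alongside the
-- UNCAPPED expansion (the bridge between the two ports)
def pvEvB (adj : List (String × List (String × Int))) (mh : Int) :
    Nat → List String → PySem.Dict String Int → List (String × String × Int)
  | 0, _, _ => []
  | _ + 1, [], _ => []
  | f + 1, node :: rest, v =>
    if mh ≤ v.getD node 0 then pvEvB adj mh f rest v
    else
      let p := pvInsB (v.getD node 0) (pvNbrs adj node) v []
      (pvNbrs adj node).map (fun q => (node, q.1, q.2)) ++ pvEvB adj mh f (rest ++ p.2) p.1

-- replay of the event stream against A's visited DICT (hops recovered from the dict)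
def pvReplayD (mn : Int) :
    List (String × String × Int) → PySem.Dict String Int → PySem.Set (String × String × Int) →
    PySem.Dict String Int × PySem.Set (String × String × Int)
  | [], v, e => (v, e)
  | (node, nbr, w) :: rest, v, e =>
    if mn ≤ (v.size : Int) then (v, e)
    else pvReplayD mn rest
      (if v.contains nbr then v else v.insert nbr (v.getD node 0 + 1))
      (PySem.Set.add e (pvEdge node nbr w))

theorem pvLoopA_cap (adj : List (String × List (String × Int))) (mn mh : Int) (f : Nat)
    (q : List (String × Int)) (v : PySem.Dict String Int)
    (e : PySem.Set (String × String × Int)) (h : mn ≤ (v.size : Int)) :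
    pvLoopA adj mn mh f q v e = (v, e) := by
  cases f with
  | zero => rfl
  | succ f =>
    cases q with
    | nil => rfl
    | cons p rest =>
      obtain ⟨node, hop⟩ := p
      simp [pvLoopA]
      omega

theorem pvReplayD_cap (mn : Int) (ev : List (String × String × Int))
    (v : PySem.Dict String Int) (e : PySem.Set (String × String × Int))
    (h : mn ≤ (v.size : Int)) : pvReplayD mn ev v e = (v, e) := by
  cases ev with
  | nil => rfl
  | cons p rest => obtain ⟨a, b, c⟩ := p; simp [pvReplayD, h]

-- contains is monotone under insert
theorem pvContains_insert_mono (v : PySem.Dict String Int) (a : String) (b : Int)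
    (k : String) (h : v.contains k = true) : (v.insert a b).contains k = true := by
  simp [PySem.Dict.contains_insert, h]

-- pvInsB: the accumulator is just appended to
theorem pvInsB_acc (hop : Int) (ns : List (String × Int)) (v : PySem.Dict String Int)
    (acc : List String) :
    pvInsB hop ns v acc = ((pvInsB hop ns v []).1, acc ++ (pvInsB hop ns v []).2) := by
  induction ns generalizing v acc with
  | nil => simp [pvInsB]
  | cons p rest ih =>
    obtain ⟨nbr, w⟩ := p
    by_cases hc : v.contains nbr = false
    · rw [pvInsB, if_pos hc, pvInsB, if_pos hc, ih _ (acc ++ [nbr]), ih _ ([] ++ [nbr])]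
      simp
    · rw [pvInsB, if_neg hc, pvInsB, if_neg hc, ih]

-- pvInsB only inserts fresh keys: existing bindings survive
theorem pvInsB_get? (hop : Int) (ns : List (String × Int)) (v : PySem.Dict String Int)
    (acc : List String) (k : String) (h : Int) (hk : v.get? k = some h) :
    ((pvInsB hop ns v acc).1).get? k = some h := by
  induction ns generalizing v acc with
  | nil => simpa [pvInsB] using hk
  | cons p rest ih =>
    obtain ⟨nbr, w⟩ := p
    by_cases hc : v.contains nbr = false
    · rw [pvInsB, if_pos hc]
      refine ih _ _ ?_
      have hne : k ≠ nbr := by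
        intro hEq
        subst hEq
        rw [PySem.Dict.contains_eq_isSome_get?, hk] at hc
        simp at hc
      rw [PySem.Dict.get?_insert_of_ne v (hop + 1) hne]
      exact hk
    · rw [pvInsB, if_neg hc]; exact ih _ _ hk

-- every node pvInsB appends to `order` is a key of the resulting dict
theorem pvInsB_new_contains (hop : Int) (ns : List (String × Int))
    (v : PySem.Dict String Int) (acc : List String)
    (hacc : ∀ n ∈ acc, v.contains n = true) :
    ∀ n ∈ (pvInsB hop ns v acc).2, ((pvInsB hop ns v acc).1).contains n = true := by
  induction ns generalizing v acc with
  | nil => simpa [pvInsB] using hacc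
  | cons p rest ih =>
    obtain ⟨nbr, w⟩ := p
    by_cases hc : v.contains nbr = false
    · rw [pvInsB, if_pos hc]
      refine ih _ _ ?_
      intro n hn
      rcases List.mem_append.mp hn with hn | hn
      · exact pvContains_insert_mono _ _ _ _ (hacc n hn)
      · simp at hn; subst hn; exact PySem.Dict.contains_insert_self _ _ _
    · rw [pvInsB, if_neg hc]; exact ih _ _ hacc

-- the universe of possibly-inserted nodes, and the potential function for the fuel bound
def pvU (adj : List (String × List (String × Int))) : List String :=
  adj.flatMap (fun p => p.2.map (·.1))

def pvPhi (adj : List (String × List (String × Int))) (v : PySem.Dict String Int) : Nat :=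
  ((PySem.Set.ofList (pvU adj)).filter (fun x => !(v.contains x))).length

-- counting helper: inserting a fresh key of U into v lowers the potential by exactly 1
theorem pvFilter_flip {α : Type} [DecidableEq α] (U : List α) (p q : α → Bool) (x : α)
    (hnd : U.Nodup) (hx : x ∈ U) (hpx : p x = true) (hqx : q x = false)
    (hagree : ∀ y ∈ U, y ≠ x → q y = p y) :
    (U.filter q).length + 1 = (U.filter p).length := by
  induction U with
  | nil => cases hx
  | cons a tl ih =>
    rcases List.mem_cons.mp hx with rfl | hx'
    · have htl : ∀ y ∈ tl, q y = p y := by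
        intro y hy
        exact hagree y (List.mem_cons_of_mem _ hy) (fun h => (List.nodup_cons.mp hnd).1 (h ▸ hy))
      have : tl.filter q = tl.filter p := List.filter_congr htl
      simp [hpx, hqx, this]
    · have ha : a ≠ x := fun h => (List.nodup_cons.mp hnd).1 (h ▸ hx')
      have hqa : q a = p a := hagree a List.mem_cons_self ha
      have := ih (List.nodup_cons.mp hnd).2 hx'
        (fun y hy hne => hagree y (List.mem_cons_of_mem _ hy) hne)
      cases hpa : p a <;> simp [hqa, hpa] <;> omega

theorem pvPhi_insert (adj : List (String × List (String × Int))) (v : PySem.Dict String Int)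
    (x : String) (k : Int) (hx : x ∈ pvU adj) (hc : v.contains x = false) :
    pvPhi adj (v.insert x k) + 1 = pvPhi adj v := by
  unfold pvPhi
  apply pvFilter_flip (PySem.Set.ofList (pvU adj)) _ _ x
  · exact PySem.Set.nodup_ofList _
  · exact (PySem.Set.mem_ofList _ _).mpr hx
  · simp [hc]
  · simp [PySem.Dict.contains_insert_self]
  · intro y _ hne
    simp [PySem.Dict.contains_insert, hne]

-- membership chains: every neighbour name comes from pvU adj
theorem pvMem_values_update {κ ν : Type} [BEq κ] [LawfulBEq κ] (l : List (κ × ν))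
    (d : PySem.Dict κ ν) (x : ν) (h : x ∈ (d.update l).values) :
    x ∈ d.values ∨ x ∈ l.map (·.2) := by
  induction l generalizing d with
  | nil => exact Or.inl h
  | cons p tl ih =>
    have h' : x ∈ ((d.insert p.1 p.2).update tl).values := h
    rcases ih (d.insert p.1 p.2) h' with h2 | h2
    · rcases PySem.Dict.mem_values_insert d p.1 p.2 x h2 with h3 | h3
      · exact Or.inr (by simp [h3])
      · exact Or.inl h3
    · exact Or.inr (by simp at h2 ⊢; exact Or.inr h2)

theorem pvMem_keys_update {κ ν : Type} [BEq κ] [LawfulBEq κ] (l : List (κ × ν))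
    (d : PySem.Dict κ ν) (k : κ) (h : k ∈ (d.update l).keys) :
    k ∈ d.keys ∨ k ∈ l.map (·.1) := by
  induction l generalizing d with
  | nil => exact Or.inl h
  | cons p tl ih =>
    have h' : k ∈ ((d.insert p.1 p.2).update tl).keys := h
    rcases ih (d.insert p.1 p.2) h' with h2 | h2
    · rcases (PySem.Dict.mem_keys_insert d p.1 k p.2).mp h2 with h3 | h3
      · exact Or.inr (by simp [h3])
      · exact Or.inl h3
    · exact Or.inr (by simp at h2 ⊢; exact Or.inr h2)

theorem pvNbrs_sub (adj : List (String × List (String × Int))) (node : String) :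
    ∀ p ∈ pvNbrs adj node, p.1 ∈ pvU adj := by
  intro p hp
  unfold pvNbrs at hp
  rw [PySem.List.mem_sorted] at hp
  rcases hg : (PySem.Dict.ofList adj).get? node with _ | l
  · rw [PySem.Dict.getD_eq_get?_getD, hg] at hp
    simp at hp
    cases hp
  · rw [PySem.Dict.getD_eq_get?_getD, hg] at hp
    have hk : p.1 ∈ (PySem.Dict.ofList l).keys := PySem.Dict.mem_keys_of_mem_items _ hp
    have hk2 : p.1 ∈ l.map (·.1) := by
      rcases pvMem_keys_update l PySem.Dict.empty p.1 hk with h | h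
      · cases h
      · exact h
    have hl : l ∈ adj.map (·.2) := by
      have hv : l ∈ (PySem.Dict.ofList adj).values := by
        have := PySem.Dict.mem_items_of_get?_eq_some _ hg
        exact List.mem_map.mpr ⟨(node, l), this, rfl⟩
      rcases pvMem_values_update adj PySem.Dict.empty l hv with h | h
      · cases h
      · exact h
    rcases List.mem_map.mp hl with ⟨pr, hpr, rfl⟩
    rcases List.mem_map.mp hk2 with ⟨q, hq, hq1⟩
    exact List.mem_flatMap.mpr ⟨pr, hpr, List.mem_map.mpr ⟨q, hq, hq1⟩⟩

-- potential accounting for the phase-1 inner loop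
theorem pvInsB_phi (adj : List (String × List (String × Int))) (hop : Int)
    (ns : List (String × Int)) (v : PySem.Dict String Int) (acc : List String)
    (hns : ∀ p ∈ ns, p.1 ∈ pvU adj) :
    (pvInsB hop ns v acc).2.length + pvPhi adj (pvInsB hop ns v acc).1 ≤
      acc.length + pvPhi adj v := by
  induction ns generalizing v acc with
  | nil => simp [pvInsB]
  | cons p rest ih =>
    obtain ⟨nbr, w⟩ := p
    by_cases hc : v.contains nbr = false
    · rw [pvInsB, if_pos hc]
      have hmem : nbr ∈ pvU adj := hns (nbr, w) List.mem_cons_self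
      have hphi := pvPhi_insert adj v nbr (hop + 1) hmem hc
      have := ih (v.insert nbr (hop + 1)) (acc ++ [nbr])
        (fun q hq => hns q (List.mem_cons_of_mem _ hq))
      simp only [List.length_append, List.length_singleton] at this
      omega
    · rw [pvInsB, if_neg hc]
      exact ih v acc (fun q hq => hns q (List.mem_cons_of_mem _ hq))

theorem pvFoldl_len (l : List (String × List (String × Int))) (n : Nat) :
    l.foldl (fun n p => n + p.2.length) n = n + (l.map (fun p => p.2.length)).sum := by
  induction l generalizing n with
  | nil => simp
  | cons p tl ih => simp [ih]; omega

theorem pvFuel_ok (adj : List (String × List (String × Int))) (v : PySem.Dict String Int) :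
    pvPhi adj v ≤ adj.foldl (fun n p => n + p.2.length) 0 := by
  calc pvPhi adj v ≤ (PySem.Set.ofList (pvU adj)).length := List.length_filter_le _ _
    _ ≤ (pvU adj).length := PySem.Set.length_ofList_le _
    _ = (adj.map (fun p => p.2.length)).sum := by
        simp [pvU, List.length_flatMap]
    _ = adj.foldl (fun n p => n + p.2.length) 0 := by rw [pvFoldl_len]; omega

-- ===== main lemma A: A's capped loop is the capped replay of the event stream =====

-- inner step: processing one node's neighbour list in A equals replaying its event block
theorem pvProcA_replay (adj : List (String × List (String × Int))) (mn mh : Int) (f : Nat)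
    (node : String) (hop : Int)
    (hIH : ∀ (qs' : List (String × Int)) (v' : PySem.Dict String Int)
      (e' : PySem.Set (String × String × Int)),
      (∀ p ∈ qs', v'.get? p.1 = some p.2) →
      pvLoopA adj mn mh f qs' v' e' =
        pvReplayD mn (pvEvB adj mh f (qs'.map (·.1)) v') v' e') :
    ∀ (ns : List (String × Int)) (v : PySem.Dict String Int) (q : List (String × Int))
      (e : PySem.Set (String × String × Int)),
      v.get? node = some hop → (∀ p ∈ q, v.get? p.1 = some p.2) →
      pvLoopA adj mn mh f (pvProcA mn node hop ns v q e).2.1 (pvProcA mn node hop ns v q e).1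
          (pvProcA mn node hop ns v q e).2.2 =
        pvReplayD mn (ns.map (fun p => (node, p.1, p.2)) ++
            pvEvB adj mh f (q.map (·.1) ++ (pvInsB hop ns v []).2) (pvInsB hop ns v []).1)
          v e := by
  intro ns
  induction ns with
  | nil =>
    intro v q e hnode hq
    simp only [pvProcA, pvInsB, List.map_nil, List.nil_append, List.append_nil]
    exact hIH q v e hq
  | cons p tl ih =>
    intro v q e hnode hq
    obtain ⟨nbr, w⟩ := p
    by_cases hcap : mn ≤ (v.size : Int)
    · have h1 : pvProcA mn node hop ((nbr, w) :: tl) v q e = (v, q, e) := by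
        rw [pvProcA, if_pos hcap]
      rw [h1]
      simp only
      rw [pvLoopA_cap _ _ _ _ _ _ _ hcap]
      rw [List.map_cons, List.cons_append, pvReplayD, if_pos hcap]
    · by_cases hc : v.contains nbr
      · have hrw : pvProcA mn node hop ((nbr, w) :: tl) v q e =
            pvProcA mn node hop tl v q (PySem.Set.add e (pvEdge node nbr w)) := by
          rw [pvProcA, if_neg hcap]
          simp [hc]
        have hins : pvInsB hop ((nbr, w) :: tl) v [] = pvInsB hop tl v [] := by
          rw [pvInsB]
          simp [hc]
        rw [hrw, hins, List.map_cons, List.cons_append, pvReplayD, if_neg hcap, if_pos hc]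
        exact ih v q _ hnode hq
      · simp only [Bool.not_eq_true] at hc
        have hne : nbr ≠ node := by
          intro hEq
          rw [PySem.Dict.contains_eq_isSome_get?, hEq, hnode] at hc
          simp at hc
        have hrw : pvProcA mn node hop ((nbr, w) :: tl) v q e =
            pvProcA mn node hop tl (v.insert nbr (hop + 1)) (q ++ [(nbr, hop + 1)])
              (PySem.Set.add e (pvEdge node nbr w)) := by
          rw [pvProcA, if_neg hcap]
          simp [hc, PySem.Dict.contains_insert_self]
        have hins : pvInsB hop ((nbr, w) :: tl) v [] =
            ((pvInsB hop tl (v.insert nbr (hop + 1)) []).1,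
              [nbr] ++ (pvInsB hop tl (v.insert nbr (hop + 1)) []).2) := by
          rw [pvInsB, if_pos hc]
          exact pvInsB_acc hop tl _ _
        have hgd : v.getD node 0 = hop := PySem.Dict.getD_of_get?_eq_some _ 0 hnode
        rw [hrw, hins, List.map_cons, List.cons_append, pvReplayD, if_neg hcap,
          if_neg (by simp [hc]), hgd]
        have := ih (v.insert nbr (hop + 1)) (q ++ [(nbr, hop + 1)])
          (PySem.Set.add e (pvEdge node nbr w))
          (by rw [PySem.Dict.get?_insert_of_ne v (hop + 1) (Ne.symm hne)]; exact hnode)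
          (by
            intro p hp
            rcases List.mem_append.mp hp with hp | hp
            · have hpk : p.1 ≠ nbr := by
                intro hEq
                have := hq p hp
                rw [PySem.Dict.contains_eq_isSome_get?, ← hEq, this] at hc
                simp at hc
              rw [PySem.Dict.get?_insert_of_ne v (hop + 1) hpk]
              exact hq p hp
            · simp at hp
              subst hp
              exact PySem.Dict.get?_insert_self _ _ _)
        rw [this]
        simp

theorem pvMainA (adj : List (String × List (String × Int))) (mn mh : Int) :
    ∀ (f : Nat) (qs : List (String × Int)) (v : PySem.Dict String Int)
      (e : PySem.Set (String × String × Int)),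
      (∀ p ∈ qs, v.get? p.1 = some p.2) →
      pvLoopA adj mn mh f qs v e = pvReplayD mn (pvEvB adj mh f (qs.map (·.1)) v) v e := by
  intro f
  induction f with
  | zero => intro qs v e _; rfl
  | succ f ih =>
    intro qs v e hcoh
    cases qs with
    | nil => rfl
    | cons p rest =>
      obtain ⟨node, hop⟩ := p
      have hnode : v.get? node = some hop := hcoh (node, hop) List.mem_cons_self
      have hgd : v.getD node 0 = hop := PySem.Dict.getD_of_get?_eq_some _ 0 hnode
      by_cases hcap : mn ≤ (v.size : Int)
      · rw [pvLoopA_cap _ _ _ _ _ _ _ hcap, pvReplayD_cap _ _ _ _ hcap]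
      · by_cases hmh : mh ≤ hop
        · rw [pvLoopA, if_pos (by omega), if_pos hmh]
          rw [List.map_cons, pvEvB, hgd, if_pos hmh]
          exact ih rest v e (fun p hp => hcoh p (List.mem_cons_of_mem _ hp))
        · rw [pvLoopA, if_pos (by omega), if_neg hmh]
          rw [List.map_cons, pvEvB, hgd, if_neg hmh]
          exact pvProcA_replay adj mn mh f node hop ih (pvNbrs adj node) v rest e hnode
            (fun p hp => hcoh p (List.mem_cons_of_mem _ hp))

-- ===== lemma B1: phase 1 + the comprehension produce exactly the event stream =====

theorem pvBlocks_append (adj : List (String × List (String × Int))) (mh : Int)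
    (v : PySem.Dict String Int) (l1 l2 : List String) :
    pvBlocks adj mh v (l1 ++ l2) = pvBlocks adj mh v l1 ++ pvBlocks adj mh v l2 := by
  simp [pvBlocks, List.filter_append]

-- phase 1 only inserts fresh keys: existing bindings survive to the final dict
theorem pvP1_get? (adj : List (String × List (String × Int))) (mh : Int) :
    ∀ (f : Nat) (qs : List String) (v : PySem.Dict String Int) (done : List String)
      (k : String) (h : Int), v.get? k = some h →
      ((pvP1 adj mh f qs v done).1).get? k = some h := by
  intro f
  induction f with
  | zero => intro qs v done k h hk; exact hk
  | succ f ih =>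
    intro qs v done k h hk
    cases qs with
    | nil => exact hk
    | cons node rest =>
      by_cases hmh : mh ≤ v.getD node 0
      · rw [pvP1, if_pos hmh]; exact ih _ _ _ _ _ hk
      · rw [pvP1, if_neg hmh]; exact ih _ _ _ _ _ (pvInsB_get? _ _ _ _ _ _ hk)

theorem pvP1_eq_evB (adj : List (String × List (String × Int))) (mh : Int) :
    ∀ (f : Nat) (qs : List String) (v : PySem.Dict String Int) (done : List String),
      (∀ n ∈ qs, v.contains n = true) →
      qs.length + pvPhi adj v ≤ f →
      pvBlocks adj mh (pvP1 adj mh f qs v done).1 (pvP1 adj mh f qs v done).2 =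
        pvBlocks adj mh (pvP1 adj mh f qs v done).1 done ++ pvEvB adj mh f qs v := by
  intro f
  induction f with
  | zero =>
    intro qs v done h1 h2
    have : qs = [] := by
      cases qs with
      | nil => rfl
      | cons a b => simp at h2
    subst this
    simp [pvP1, pvEvB]
  | succ f ih =>
    intro qs v done h1 h2
    cases qs with
    | nil => simp [pvP1, pvEvB]
    | cons node rest =>
      have hnode : v.contains node = true := h1 node List.mem_cons_self
      obtain ⟨h0, hg0⟩ : ∃ h0, v.get? node = some h0 := by
        rw [PySem.Dict.contains_eq_isSome_get?] at hnode
        exact Option.isSome_iff_exists.mp hnode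
      by_cases hmh : mh ≤ v.getD node 0
      · rw [pvP1, if_pos hmh, pvEvB, if_pos hmh]
        have hrec := ih rest v (done ++ [node])
          (fun n hn => h1 n (List.mem_cons_of_mem _ hn))
          (by simp at h2 ⊢; omega)
        rw [hrec, pvBlocks_append]
        have hstable : ((pvP1 adj mh f rest v (done ++ [node])).1).getD node 0 =
            v.getD node 0 := by
          rw [PySem.Dict.getD_of_get?_eq_some _ 0 (pvP1_get? adj mh f rest v _ node h0 hg0),
            PySem.Dict.getD_of_get?_eq_some _ 0 hg0]
        have hblocknode : pvBlocks adj mh (pvP1 adj mh f rest v (done ++ [node])).1 [node] = [] := by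
          simp [pvBlocks, hstable]
          omega
        rw [hblocknode]
        simp
      · rw [pvP1, if_neg hmh, pvEvB, if_neg hmh]
        simp only
        set p := pvInsB (v.getD node 0) (pvNbrs adj node) v [] with hp
        have hsub := pvNbrs_sub adj node
        have hphi := pvInsB_phi adj (v.getD node 0) (pvNbrs adj node) v [] hsub
        rw [← hp] at hphi
        have hrest : ∀ n ∈ rest ++ p.2, p.1.contains n = true := by
          intro n hn
          rcases List.mem_append.mp hn with hn | hn
          · obtain ⟨hn', hgn⟩ : ∃ hh, v.get? n = some hh := by
              have := h1 n (List.mem_cons_of_mem _ hn)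
              rw [PySem.Dict.contains_eq_isSome_get?] at this
              exact Option.isSome_iff_exists.mp this
            rw [PySem.Dict.contains_eq_isSome_get?, pvInsB_get? _ _ _ _ _ _ hgn]
            rfl
          · exact pvInsB_new_contains _ _ _ _ (by simp) n hn
        have hrec := ih (rest ++ p.2) p.1 (done ++ [node]) hrest
          (by simp at h2 hphi ⊢; omega)
        rw [hrec, pvBlocks_append]
        have hstable : ((pvP1 adj mh f (rest ++ p.2) p.1 (done ++ [node])).1).getD node 0 =
            v.getD node 0 := by
          have hg1 : p.1.get? node = some h0 := pvInsB_get? _ _ _ _ _ _ hg0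
          rw [PySem.Dict.getD_of_get?_eq_some _ 0 (pvP1_get? adj mh f _ _ _ node h0 hg1),
            PySem.Dict.getD_of_get?_eq_some _ 0 hg0]
        have hblocknode : pvBlocks adj mh (pvP1 adj mh f (rest ++ p.2) p.1 (done ++ [node])).1 [node] =
            (pvNbrs adj node).map (fun q => (node, q.1, q.2)) := by
          have hlt : ((pvP1 adj mh f (rest ++ p.2) p.1 (done ++ [node])).1).getD node 0 < mh := by
            rw [hstable]; omega
          simp [pvBlocks, hlt]
        rw [hblocknode]
        simp

-- ===== lemma R: the dict-based replay projects onto B's set-based replay =====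

theorem pvReplayR (mn : Int) :
    ∀ (ev : List (String × String × Int)) (v : PySem.Dict String Int)
      (e : PySem.Set (String × String × Int)), v.keys.Nodup →
      pvReplayB mn ev (PySem.Set.ofList v.keys) e =
        (PySem.Set.ofList (pvReplayD mn ev v e).1.keys, (pvReplayD mn ev v e).2) := by
  intro ev
  induction ev with
  | nil => intro v e _; rfl
  | cons p rest ih =>
    intro v e hnd
    obtain ⟨node, nbr, w⟩ := p
    have hkeys : PySem.Set.ofList v.keys = v.keys := PySem.Set.ofList_eq_self_of_nodup _ hnd
    have hlen : ((PySem.Set.ofList v.keys).length : Int) = (v.size : Int) := by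
      rw [hkeys]
      simp [PySem.Dict.keys, PySem.Dict.size]
    by_cases hcap : mn ≤ (v.size : Int)
    · rw [pvReplayB, pvReplayD, if_pos hcap, if_pos (by omega)]
    · rw [pvReplayB, pvReplayD, if_neg hcap, if_neg (by omega)]
      by_cases hc : v.contains nbr
      · have hmem : nbr ∈ v.keys := (PySem.Dict.contains_iff_mem_keys _ _).mp hc
        have hadd : PySem.Set.add (PySem.Set.ofList v.keys) nbr = PySem.Set.ofList v.keys := by
          rw [hkeys]
          exact PySem.Set.add_of_mem hmem
        rw [if_pos hc, hadd]
        exact ih v _ hnd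
      · simp only [Bool.not_eq_true] at hc
        have hmem : nbr ∉ v.keys := by
          intro hmem
          rw [(PySem.Dict.contains_iff_mem_keys _ _).mpr hmem] at hc
          cases hc
        have hadd : PySem.Set.add (PySem.Set.ofList v.keys) nbr =
            PySem.Set.ofList ((v.insert nbr (v.getD node 0 + 1)).keys) := by
          rw [hkeys, PySem.Set.add_of_not_mem hmem,
            PySem.Dict.keys_insert_of_not_contains v _ hc,
            PySem.Set.ofList_eq_self_of_nodup _ ?_]
          rw [← PySem.Dict.keys_insert_of_not_contains v (v.getD node 0 + 1) hc]
          exact PySem.Dict.nodup_keys_insert _ _ _ hnd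
        rw [if_neg (by simp [hc]), hadd]
        exact ih _ _ (PySem.Dict.nodup_keys_insert _ _ _ hnd)

-- ===== VERDICT (by name: the statement is the Claim_ definition above) =====
theorem bfs_subgraph_spec : Claim_equal_bfs_subgraph := by
  intro seed_id adj max_nodes max_hops _
  unfold Spec_bfs_subgraph bfs_subgraph bfs_subgraph_alt
  simp only
  set v0 : PySem.Dict String Int := PySem.Dict.insert PySem.Dict.empty seed_id 0 with hv0
  set F := 1 + adj.foldl (fun n p => n + p.2.length) 0 with hF
  have hseed : v0.get? seed_id = some 0 := PySem.Dict.get?_insert_self _ _ _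
  have hnd0 : v0.keys.Nodup :=
    PySem.Dict.nodup_keys_insert _ _ _ PySem.Dict.nodup_keys_empty
  -- A's loop = capped replay of the event stream
  have hA : pvLoopA adj max_nodes max_hops F [(seed_id, 0)] v0 PySem.Set.empty =
      pvReplayD max_nodes (pvEvB adj max_hops F [seed_id] v0) v0 PySem.Set.empty := by
    have := pvMainA adj max_nodes max_hops F [(seed_id, 0)] v0 PySem.Set.empty
      (by intro p hp; simp at hp; subst hp; exact hseed)
    simpa using this
  -- B's phase 1 + comprehension = the same event stream
  have hB : pvBlocks adj max_hops (pvP1 adj max_hops F [seed_id] v0 []).1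
      (pvP1 adj max_hops F [seed_id] v0 []).2 = pvEvB adj max_hops F [seed_id] v0 := by
    have := pvP1_eq_evB adj max_hops F [seed_id] v0 []
      (by intro n hn; simp at hn; rw [hn]; exact PySem.Dict.contains_insert_self _ _ _)
      (by have := pvFuel_ok adj v0; simp [hF]; omega)
    simpa [pvBlocks] using this
  -- B's initial node set is the key set of v0
  have hkeys0 : v0.keys = [seed_id] := by
    rw [hv0, PySem.Dict.keys_insert_of_not_contains _ _ (by simp [PySem.Dict.contains_empty])]
    simp [PySem.Dict.keys_empty]
  have hset0 : PySem.Set.add PySem.Set.empty seed_id = PySem.Set.ofList v0.keys := by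
    rw [hkeys0]
    rfl
  rw [hA, hB, hset0, pvReplayR max_nodes _ v0 PySem.Set.empty hnd0]
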